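-- pv_equiv track=rewrite | github.com/pypi-data/pypi-mirror-392 | packages/stanlogic/stanlogic-1.1.2-py3-none-any.whl/stanlogic/kmapsolver.py | filter_prime_implicants
-- ===== SOURCE A (Python) =====
-- def filter_prime_implicants(groups):
--     """
--     Remove redundant groups that are completely covered by larger groups.
--     Uses bitmask operations for efficient subset checking.
--
--     Args:
--         groups: List of integer bitmasks representing K-map groups
--
--     Returns:
--         List of prime implicant bitmasks (non-redundant groups)
--     """
--     primes = []
--     # Sort by size (bit count) descending for early pruning
--     groups_sorted = sorted(groups, key=lambda g: g.bit_count(), reverse=True)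
--
--     for i, g in enumerate(groups_sorted):
--         is_subset = False
--         # Check if g is a subset of any other group
--         for other in groups_sorted:
--             if other == g:
--                 continue
--             # Bitwise AND: if g is subset of other, (g & other) == g
--             if (g & other) == g:
--                 is_subset = True
--                 break
--         if not is_subset:
--             primes.append(g)
--     return primes
-- ===== SOURCE B (Python) =====
-- def filter_prime_implicants(groups):
--     """
--     Remove redundant groups that are completely covered by larger groups.
--     Classic incremental maximal-set: keep a running set of maximal bitmasks,
--     dropping a new group covered by a current maximum and evicting current
--     maxima covered by the new group.
--     """
--     maximal = []
--     for g in set(groups):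
--         if any((g & m) == g for m in maximal):
--             continue
--         maximal = [m for m in maximal if (m & g) != m]
--         maximal.append(g)
--     keep = set(maximal)
--     return [g for g in sorted(groups, key=lambda g: g.bit_count(), reverse=True) if g in keep]
-- ===== Notes on version B (the rewrite author's own statement) =====
-- stated objective: faster
-- what changed: A tests every group against the entire sorted list with a fresh inner scan; B runs the classic incremental maximal-set pass over the distinct groups (skip a group covered by a current maximum, evict maxima the new group covers) and then emits the surviving maxima by one membership filter over the popcount-sorted list.
import Mathlib
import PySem

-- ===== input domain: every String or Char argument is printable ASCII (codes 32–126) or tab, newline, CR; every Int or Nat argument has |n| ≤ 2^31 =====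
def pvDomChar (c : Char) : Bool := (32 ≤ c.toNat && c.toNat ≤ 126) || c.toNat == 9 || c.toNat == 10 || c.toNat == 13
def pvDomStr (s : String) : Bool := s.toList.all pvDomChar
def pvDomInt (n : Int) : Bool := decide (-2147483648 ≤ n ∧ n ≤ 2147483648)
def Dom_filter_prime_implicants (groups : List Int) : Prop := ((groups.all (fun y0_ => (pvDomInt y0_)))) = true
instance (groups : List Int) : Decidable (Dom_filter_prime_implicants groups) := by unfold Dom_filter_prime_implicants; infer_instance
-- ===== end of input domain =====

-- B replaces A's full quadratic rescan by the classic incremental maximal-set pass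
-- over the distinct groups, testing each group only against the current maxima.

-- ===== PORT A =====
-- inner loop: 'for other in groups_sorted: if other == g: continue; if (g & other) == g: is_subset = True; break'
def pvA_scan (g : Int) : List Int → Bool
  | [] => false
  | other :: rest =>
    if other == g then pvA_scan g rest
    else if PySem.Int.band g other == g then true
    else pvA_scan g rest

def filter_prime_implicants (groups : List Int) : List Int :=
  let groups_sorted := PySem.List.sorted groups (fun g => PySem.Int.bitCount g) true
  (PySem.List.enumerate groups_sorted).foldl
    (fun primes ig => if pvA_scan ig.2 groups_sorted then primes else primes ++ [ig.2]) []

-- ===== PORT B =====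
-- loop body: skip g if a current maximum covers it, else evict maxima covered by g and append g
def pvB_step (M : List Int) (g : Int) : List Int :=
  if M.any (fun m => PySem.Int.band g m == g) then M
  else (M.filter (fun m => PySem.Int.band m g != m)) ++ [g]

def filter_prime_implicants_alt (groups : List Int) : List Int :=
  let maximal := (PySem.Set.ofList groups).foldl pvB_step []
  let keep := PySem.Set.ofList maximal
  (PySem.List.sorted groups (fun g => PySem.Int.bitCount g) true).filter (fun g => PySem.Set.contains keep g)

-- ===== PRECONDITION & SPEC =====
def Spec_filter_prime_implicants (groups : List Int) (out : List Int) : Prop := out = filter_prime_implicants_alt groups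
instance (groups : List Int) (out : List Int) : Decidable (Spec_filter_prime_implicants groups out) := by unfold Spec_filter_prime_implicants; infer_instance

-- ===== CLAIM (what is proved, stated in full; the proofs are below) =====
def Claim_equal_filter_prime_implicants : Prop := ∀ (groups : List Int), Dom_filter_prime_implicants groups → Spec_filter_prime_implicants groups (filter_prime_implicants groups)

-- ===== LEMMAS AND PROOFS =====

-- `v` is dominated in G: some distinct group of G covers v's mask
def pvCovered (G : List Int) (v : Int) : Prop := ∃ h ∈ G, h ≠ v ∧ PySem.Int.band v h = v

-- Python's infinite-two's-complement bit i of an Int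
def pvTb (a : Int) (i : Nat) : Bool := if 0 ≤ a then a.toNat.testBit i else !((-a-1).toNat.testBit i)

theorem pv_band_sub_iff (a b : Int) : PySem.Int.band a b = a ↔ ∀ i, pvTb a i = true → pvTb b i = true := by
  by_cases ha : 0 ≤ a <;> by_cases hb : 0 ≤ b
  · -- both nonneg
    simp only [PySem.Int.band, pvTb, ha, hb, if_true]
    constructor
    · intro h i hi
      have h' : a.toNat &&& b.toNat = a.toNat := by
        have := Int.toNat_of_nonneg ha
        omega
      have := congrArg (fun x => x.testBit i) h'
      simp only [Nat.testBit_and] at this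
      cases hatb : a.toNat.testBit i <;> cases hbtb : b.toNat.testBit i <;> simp_all
    · intro h
      have h' : a.toNat &&& b.toNat = a.toNat := by
        apply Nat.eq_of_testBit_eq; intro i
        simp only [Nat.testBit_and]
        cases hatb : a.toNat.testBit i <;> cases hbtb : b.toNat.testBit i <;> simp_all [h i]
      rw [h']; omega
  · -- a nonneg, b neg
    simp only [PySem.Int.band, pvTb, ha, hb, if_true, if_false]
    have hle : a.toNat &&& (-b-1).toNat ≤ a.toNat := Nat.and_le_left
    constructor
    · intro h i hi
      have h' : a.toNat &&& (-b-1).toNat = 0 := by omega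
      have := congrArg (fun x => x.testBit i) h'
      simp only [Nat.testBit_and, Nat.zero_testBit] at this
      simp_all
    · intro h
      have h' : a.toNat &&& (-b-1).toNat = 0 := by
        apply Nat.eq_of_testBit_eq; intro i
        simp only [Nat.testBit_and, Nat.zero_testBit]
        cases hatb : a.toNat.testBit i <;> cases hbtb : (-b-1).toNat.testBit i <;> simp_all
      rw [h']; omega
  · -- a neg, b nonneg
    simp only [PySem.Int.band, pvTb, ha, hb, if_true, if_false]
    constructor
    · intro h
      exfalso; omega
    · intro h
      exfalso
      set i := ((-a).toNat - 1) + b.toNat with hi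
      have h1 : ((-a).toNat - 1).testBit i = false :=
        Nat.testBit_eq_false_of_lt (lt_of_lt_of_le Nat.lt_two_pow_self (Nat.pow_le_pow_right (by norm_num) (by omega)))
      have h2 : b.toNat.testBit i = false :=
        Nat.testBit_eq_false_of_lt (lt_of_lt_of_le Nat.lt_two_pow_self (Nat.pow_le_pow_right (by norm_num) (by omega)))
      have e : (-a - 1).toNat = (-a).toNat - 1 := by omega
      have := h i (by rw [e]; simp [h1])
      simp [h2] at this
  · -- both neg
    simp only [PySem.Int.band, pvTb, ha, hb, if_false]
    constructor
    · intro h i hi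
      have h' : (-a-1).toNat ||| (-b-1).toNat = (-a-1).toNat := by omega
      have := congrArg (fun x => x.testBit i) h'
      simp only [Nat.testBit_or] at this
      cases hatb : (-a-1).toNat.testBit i <;> cases hbtb : (-b-1).toNat.testBit i <;> simp_all
    · intro h
      have h' : (-a-1).toNat ||| (-b-1).toNat = (-a-1).toNat := by
        apply Nat.eq_of_testBit_eq; intro i
        simp only [Nat.testBit_or]
        cases hatb : (-a-1).toNat.testBit i <;> cases hbtb : (-b-1).toNat.testBit i <;> simp_all
      rw [h']; omega

theorem pv_band_trans (a b c : Int) (h1 : PySem.Int.band a b = a) (h2 : PySem.Int.band b c = b) : PySem.Int.band a c = a := by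
  rw [pv_band_sub_iff] at *
  exact fun i hi => h2 i (h1 i hi)

theorem pv_band_antisym (a b : Int) (h1 : PySem.Int.band a b = a) (h2 : PySem.Int.band b a = b) : a = b := by
  rw [← h1, PySem.Int.band_comm, h2]

theorem pv_countP_lt {α : Type} (l : List α) (p q : α → Bool) (hpq : ∀ x ∈ l, p x = true → q x = true)
    (x : α) (hx : x ∈ l) (hqx : q x = true) (hpx : p x = false) : l.countP p < l.countP q := by
  induction l with
  | nil => simp at hx
  | cons y t ih =>
    rcases List.mem_cons.mp hx with rfl | hxt
    · have hle : t.countP p ≤ t.countP q := List.countP_mono_left (fun z hz => hpq z (List.mem_cons_of_mem _ hz))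
      rw [List.countP_cons, List.countP_cons]
      simp only [hpx, hqx]
      simp
      omega
    · have hy : p y = true → q y = true := hpq y List.mem_cons_self
      have := ih (fun z hz h => hpq z (List.mem_cons_of_mem _ hz) h) hxt
      rw [List.countP_cons, List.countP_cons]
      cases hpy : p y <;> cases hqy : q y <;> (simp_all; try omega)

theorem pv_exists_max_aux (G : List Int) :
    ∀ (n : Nat) (v : Int), G.countP (fun x => decide (x ≠ v ∧ PySem.Int.band v x = v)) ≤ n →
      pvCovered G v → ∃ h0 ∈ G, (h0 ≠ v ∧ PySem.Int.band v h0 = v) ∧ ¬ pvCovered G h0 := by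
  intro n
  induction n with
  | zero =>
    intro v hc hdom
    exfalso
    obtain ⟨h, hG, hne, hband⟩ := hdom
    have : 0 < G.countP (fun x => decide (x ≠ v ∧ PySem.Int.band v x = v)) := by
      rw [List.countP_pos_iff]
      exact ⟨h, hG, by simp [hne, hband]⟩
    omega
  | succ n ih =>
    intro v hc hdom
    obtain ⟨h, hG, hne, hband⟩ := hdom
    by_cases hd : pvCovered G h
    · have hlt : G.countP (fun x => decide (x ≠ h ∧ PySem.Int.band h x = h)) <
          G.countP (fun x => decide (x ≠ v ∧ PySem.Int.band v x = v)) := by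
        apply pv_countP_lt G _ _ ?_ h hG (by simp [hne, hband]) (by simp)
        intro x hxG hx
        simp only [decide_eq_true_eq] at hx ⊢
        obtain ⟨hxh, hbx⟩ := hx
        refine ⟨?_, pv_band_trans v h x hband hbx⟩
        intro hxv
        subst hxv
        exact hne (pv_band_antisym _ h hband hbx).symm
      obtain ⟨h0, hG0, ⟨hne0, hband0⟩, hmax⟩ := ih h (by omega) hd
      refine ⟨h0, hG0, ⟨?_, pv_band_trans v h h0 hband hband0⟩, hmax⟩
      intro h0v
      subst h0v
      exact hne (pv_band_antisym h h0 hband0 hband)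
    · exact ⟨h, hG, ⟨hne, hband⟩, hd⟩

theorem pv_exists_max (G : List Int) (v : Int) (h : pvCovered G v) :
    ∃ h0 ∈ G, (h0 ≠ v ∧ PySem.Int.band v h0 = v) ∧ ¬ pvCovered G h0 :=
  pv_exists_max_aux G _ v le_rfl h

theorem pv_scanA_eq (g : Int) (xs : List Int) :
    pvA_scan g xs = xs.any (fun h => h != g && PySem.Int.band g h == g) := by
  induction xs with
  | nil => rfl
  | cons other rest ih =>
    simp only [pvA_scan, List.any_cons]
    by_cases h1 : other = g
    · simp [h1, ih]
    · by_cases h2 : PySem.Int.band g other = g <;> simp [h1, h2, ih, bne_iff_ne]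

theorem pv_foldA (C : Int → Bool) :
    ∀ (xs : List Int) (s : Int) (acc : List Int),
      (PySem.List.enumerate xs s).foldl (fun primes ig => if C ig.2 then primes else primes ++ [ig.2]) acc
        = acc ++ xs.filter (fun g => !C g) := by
  intro xs
  induction xs with
  | nil => intro s acc; simp [PySem.List.enumerate]
  | cons x t ih =>
    intro s acc
    rw [PySem.List.enumerate_cons, List.foldl_cons]
    by_cases hc : C x <;> simp [hc, ih]

theorem pv_foldB_inv :
    ∀ (rest P acc : List Int),
      (P ++ rest).Nodup →
      (∀ x, x ∈ acc ↔ x ∈ P ∧ ¬ pvCovered P x) →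
      ∀ v, (v ∈ rest.foldl pvB_step acc ↔ v ∈ P ++ rest ∧ ¬ pvCovered (P ++ rest) v) := by
  intro rest
  induction rest with
  | nil =>
    intro P acc _ hacc v
    simpa using hacc v
  | cons g t ih =>
    intro P acc hnd hacc v
    have hgP : g ∉ P := by
      have hd := List.disjoint_of_nodup_append hnd
      exact fun h => hd h List.mem_cons_self
    have hassoc : P ++ g :: t = (P ++ [g]) ++ t := by simp
    have hnd' : ((P ++ [g]) ++ t).Nodup := hassoc ▸ hnd
    rw [List.foldl_cons, hassoc]
    unfold pvB_step
    by_cases hb : acc.any (fun m => PySem.Int.band g m == g)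
    · -- blocked: some accepted maximum covers g
      obtain ⟨m, hmacc, hmb⟩ := List.any_eq_true.mp hb
      have hmband : PySem.Int.band g m = g := by simpa using hmb
      obtain ⟨hmP, hmmax⟩ := (hacc m).mp hmacc
      have hmg : m ≠ g := fun h => hgP (h ▸ hmP)
      rw [if_pos hb]
      refine ih (P ++ [g]) acc hnd' ?_ v
      intro x
      rw [hacc x]
      constructor
      · rintro ⟨hxP, hxm⟩
        refine ⟨by simp [hxP], ?_⟩
        rintro ⟨h, hmem, hne, hband⟩
        rcases List.mem_append.mp hmem with h' | h'
        · exact hxm ⟨h, h', hne, hband⟩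
        · simp at h'; subst h'
          -- g covers x, m covers g ⇒ m covers x
          have hxmband : PySem.Int.band x m = x := pv_band_trans x _ m hband hmband
          have hmx : m ≠ x := by
            intro h; subst h
            exact hne (pv_band_antisym _ m hmband hband)
          exact hxm ⟨m, hmP, hmx, hxmband⟩
      · rintro ⟨hxP, hxm⟩
        rcases List.mem_append.mp hxP with h' | h'
        · refine ⟨h', fun ⟨h, hh, hne, hband⟩ => hxm ⟨h, by simp [hh], hne, hband⟩⟩
        · simp at h'; subst h'
          exact absurd ⟨m, by simp [hmP], hmg, hmband⟩ hxm
    · -- not blocked: g is a new maximal element, evict maxima it covers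
      have hb' : acc.any (fun m => PySem.Int.band g m == g) = false := by
        rw [← Bool.not_eq_true]; exact hb
      have hnb : ∀ m ∈ acc, PySem.Int.band g m ≠ g := by
        intro m hm
        have := List.any_eq_false.mp hb' m hm
        simpa using this
      have hng : ¬ pvCovered P g := by
        intro hdom
        obtain ⟨h0, hG0, ⟨hne0, hband0⟩, hmax⟩ := pv_exists_max P g hdom
        exact hnb h0 ((hacc h0).mpr ⟨hG0, hmax⟩) hband0
      rw [if_neg hb]
      refine ih (P ++ [g]) _ hnd' ?_ v
      intro x
      constructor
      · intro hx
        rcases List.mem_append.mp hx with hxf | hxg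
        · obtain ⟨hxacc, hxkeep⟩ := List.mem_filter.mp hxf
          obtain ⟨hxP, hxm⟩ := (hacc x).mp hxacc
          have hxg : PySem.Int.band x g ≠ x := by simpa using hxkeep
          refine ⟨by simp [hxP], ?_⟩
          rintro ⟨h, hmem, hne, hband⟩
          rcases List.mem_append.mp hmem with h' | h'
          · exact hxm ⟨h, h', hne, hband⟩
          · simp at h'; subst h'; exact hxg hband
        · simp at hxg; subst hxg
          refine ⟨by simp, ?_⟩
          rintro ⟨h, hmem, hne, hband⟩
          rcases List.mem_append.mp hmem with h' | h'
          · exact hng ⟨h, h', hne, hband⟩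
          · simp at h'; exact hne h'
      · rintro ⟨hxP, hxm⟩
        rcases List.mem_append.mp hxP with h' | h'
        · refine List.mem_append.mpr (Or.inl (List.mem_filter.mpr ⟨(hacc x).mpr ⟨h', ?_⟩, ?_⟩))
          · rintro ⟨h, hh, hne, hband⟩
            exact hxm ⟨h, by simp [hh], hne, hband⟩
          · simp only [bne_iff_ne, ne_eq]
            intro hband
            have hgx : g ≠ x := fun h => hgP (h ▸ h')
            exact hxm ⟨g, by simp, hgx, hband⟩
        · simp at h'; subst h'; simp

theorem pv_covered_congr (G G' : List Int) (h : ∀ x, x ∈ G ↔ x ∈ G') (v : Int) :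
    pvCovered G v ↔ pvCovered G' v := by
  unfold pvCovered
  constructor
  · rintro ⟨h0, hm, hp⟩; exact ⟨h0, (h h0).mp hm, hp⟩
  · rintro ⟨h0, hm, hp⟩; exact ⟨h0, (h h0).mpr hm, hp⟩

theorem pv_AB (groups : List Int) : filter_prime_implicants groups = filter_prime_implicants_alt groups := by
  unfold filter_prime_implicants filter_prime_implicants_alt
  simp only []
  rw [pv_foldA (fun g => pvA_scan g (PySem.List.sorted groups (fun g => PySem.Int.bitCount g) true))
      (PySem.List.sorted groups (fun g => PySem.Int.bitCount g) true) 0 []]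
  rw [List.nil_append]
  apply List.filter_congr
  intro g hg
  have hgroups : g ∈ groups := (PySem.List.mem_sorted _ _ _ _).mp hg
  have hmemD : ∀ x : Int, x ∈ PySem.Set.ofList groups ↔ x ∈ groups := fun x => PySem.Set.mem_ofList groups x
  have hcov : ∀ v, pvCovered (PySem.Set.ofList groups) v ↔ pvCovered groups v :=
    fun v => pv_covered_congr _ _ hmemD v
  have hprimes := pv_foldB_inv (PySem.Set.ofList groups) [] []
    (by simp [PySem.Set.nodup_ofList (xs := groups)])
    (by simp [pvCovered])
  -- both sides equal decide (¬ pvCovered groups g)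
  have hA : (!pvA_scan g (PySem.List.sorted groups (fun g => PySem.Int.bitCount g) true)) = true ↔ ¬ pvCovered groups g := by
    rw [pv_scanA_eq, Bool.not_eq_true']
    rw [List.any_eq_false]
    constructor
    · intro h hdom
      obtain ⟨h0, hG0, hne0, hband0⟩ := hdom
      have h0mem : h0 ∈ PySem.List.sorted groups (fun g => PySem.Int.bitCount g) true := (PySem.List.mem_sorted _ _ _ _).mpr hG0
      exact h h0 h0mem (by simp [bne_iff_ne, hne0, hband0])
    · intro h x hx hpx
      apply h
      simp only [bne_iff_ne, Bool.and_eq_true, ne_eq, beq_iff_eq] at hpx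
      exact ⟨x, (PySem.List.mem_sorted _ _ _ _).mp hx, hpx.1, hpx.2⟩
  have hB : PySem.Set.contains (PySem.Set.ofList ((PySem.Set.ofList groups).foldl pvB_step [])) g = true ↔ ¬ pvCovered groups g := by
    have hc : PySem.Set.contains (PySem.Set.ofList ((PySem.Set.ofList groups).foldl pvB_step [])) g = true ↔
        g ∈ (PySem.Set.ofList groups).foldl pvB_step [] := by
      simp [PySem.Set.contains, PySem.Set.mem_ofList]
    rw [hc, hprimes g]
    simp only [List.nil_append]
    rw [hmemD g, hcov g]
    constructor
    · rintro ⟨_, h⟩; exact h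
    · intro h; exact ⟨hgroups, h⟩
  rw [Bool.eq_iff_iff]
  exact hA.trans hB.symm

-- ===== VERDICT (by name: the statement is the Claim_ definition above) =====
theorem filter_prime_implicants_spec : Claim_equal_filter_prime_implicants := by
  intro groups _
  unfold Spec_filter_prime_implicants
  exact pv_AB groups
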